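-- pv_equiv track=rewrite | github.com/Princemachiavelli/advent-of-code | 2021/day4.py | getOG
-- ===== SOURCE A (Python) =====
-- def getOG(data = None):
--     commonBit = {}
--     for line in data.split("\n"):
--         if len(line) == 0:
--             continue
--         for x in range(0, len(line)):
--             if x not in commonBit:
--                 # 0,1s
--                 commonBit[x] = 0
--             bit = line[x]
--             if bit == "0":
--                 commonBit[x] -= 1
--             if bit == "1":
--                 commonBit[x] += 1
--     s = ""
--     s2 = ""
--     for i,bit in commonBit.items():
--         if bit > 0:
--             s = s + "1"
--             s2 = s2 + "0"
--         elif bit < 0: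
--             s = s + "0"
--             s2 = s2 + "1"
--         else:
--             s += "S"
--             s2 += "S"
--     gamma = s
--     esp = s2
--     return(gamma, esp)
-- ===== SOURCE B (Python) =====
-- def getOG(data=None):
--     # Transpose-and-count: iterate column-by-column over the non-empty lines.
--     lines = [l for l in data.split("\n") if l]
--     width = 0
--     for l in lines:
--         width = max(width, len(l))
--     gamma = []
--     eps = []
--     for x in range(width):
--         col = [l[x] for l in lines if x < len(l)]
--         ones = col.count('1')
--         zeros = col.count('0')
--         if ones > zeros:
--             gamma.append('1'); eps.append('0')
--         elif zeros > ones: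
--             gamma.append('0'); eps.append('1')
--         else:
--             gamma.append('S'); eps.append('S')
--     return ("".join(gamma), "".join(eps))
-- ===== Notes on version B (the rewrite author's own statement) =====
-- stated objective: idiomatic
-- what changed: Replaces the streaming per-character signed-accumulator dict with a transpose-style decomposition: filter empty lines, then for each column index count '1's and '0's and compare the counts.
import Mathlib
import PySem

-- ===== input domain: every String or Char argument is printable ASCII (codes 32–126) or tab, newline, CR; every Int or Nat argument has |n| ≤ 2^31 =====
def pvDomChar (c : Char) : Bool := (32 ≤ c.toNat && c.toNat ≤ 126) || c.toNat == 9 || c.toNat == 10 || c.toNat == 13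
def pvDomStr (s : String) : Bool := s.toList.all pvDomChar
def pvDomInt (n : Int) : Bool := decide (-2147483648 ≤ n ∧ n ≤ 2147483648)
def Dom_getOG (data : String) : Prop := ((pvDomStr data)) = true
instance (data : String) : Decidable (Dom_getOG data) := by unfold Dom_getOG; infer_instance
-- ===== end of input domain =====

-- B replaces A's streaming signed-accumulator dict with a column-wise transpose-and-count
-- decomposition (idiomatic); return values only, neither version has side effects.

-- ===== PORT A =====
-- A: stream every character of every non-empty line into a dict column ↦ (#'1' − #'0'),
-- then render the dict items into the two strings.
def getOG (data : String) : String × String :=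
  let cb : PySem.Dict Int Int :=
    (PySem.Chars.splitOn data.toList ['\n']).foldl (fun cb line =>
      if line.length = 0 then cb
      else (PySem.List.pyRange 0 (line.length : Int) 1).foldl (fun cb x =>
        let cb := if cb.contains x then cb else cb.insert x 0
        let bit := PySem.List.pyGetD line x ' '   -- line[x]; x ∈ range(len(line)), always in range
        let cb := if bit = '0' then cb.modify x 0 (fun v => v - 1) else cb
        if bit = '1' then cb.modify x 0 (fun v => v + 1) else cb) cb)
      PySem.Dict.empty
  let p := cb.items.foldl (fun (p : List Char × List Char) kv =>
      if kv.2 > 0 then (p.1 ++ ['1'], p.2 ++ ['0'])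
      else if kv.2 < 0 then (p.1 ++ ['0'], p.2 ++ ['1'])
      else (p.1 ++ ['S'], p.2 ++ ['S'])) ([], [])
  (String.ofList p.1, String.ofList p.2)

-- ===== PORT B =====
-- B: filter out the empty lines, compute the width, then per column count '1's and '0's.
def getOG_alt (data : String) : String × String :=
  let lines := (PySem.Chars.splitOn data.toList ['\n']).filter (fun l => l ≠ [])
  let width := lines.foldl (fun m l => max m l.length) 0
  let p := (List.range width).foldl (fun (p : List Char × List Char) x =>
      let col := lines.filterMap (fun l => l[x]?)
      let ones := col.count '1'
      let zeros := col.count '0'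
      if ones > zeros then (p.1 ++ ['1'], p.2 ++ ['0'])
      else if zeros > ones then (p.1 ++ ['0'], p.2 ++ ['1'])
      else (p.1 ++ ['S'], p.2 ++ ['S'])) ([], [])
  (String.ofList p.1, String.ofList p.2)

-- ===== PRECONDITION & SPEC =====
def Spec_getOG (data : String) (out : String × String) : Prop := out = getOG_alt data
instance (data : String) (out : String × String) : Decidable (Spec_getOG data out) := by unfold Spec_getOG; infer_instance

-- ===== CLAIM (what is proved, stated in full; the proofs are below) =====
def Claim_equal_getOG : Prop := ∀ (data : String), Dom_getOG data → Spec_getOG data (getOG data)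

-- ===== LEMMAS AND PROOFS =====

/-- `+1` for `'1'`, `-1` for `'0'`, `0` otherwise (A's per-character dict update). -/
def pvBitval (c : Char) : Int := if c = '1' then 1 else if c = '0' then -1 else 0

/-- `[0, 1, …, n-1]` as `Int`s: the key list of A's dict. -/
def pvIntRange (n : Nat) : List Int := PySem.List.pyRange 0 (n : Int) 1

/-- A's inner per-character step (the lambda inside `getOG`, named for the lemmas). -/
def pvStep (line : List Char) (cb : PySem.Dict Int Int) (x : Int) : PySem.Dict Int Int :=
  let cb := if cb.contains x then cb else cb.insert x 0
  let bit := PySem.List.pyGetD line x ' '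
  let cb := if bit = '0' then cb.modify x 0 (fun v => v - 1) else cb
  if bit = '1' then cb.modify x 0 (fun v => v + 1) else cb

/-- A's per-line step. -/
def pvLineStep (cb : PySem.Dict Int Int) (line : List Char) : PySem.Dict Int Int :=
  if line.length = 0 then cb
  else (PySem.List.pyRange 0 (line.length : Int) 1).foldl (pvStep line) cb

/-- Contribution of the first `n` characters of `line` to the key `v`. -/
def pvContribN (line : List Char) (n : Nat) (v : Int) : Int :=
  if 0 ≤ v ∧ v < (n : Int) then pvBitval (line.getD v.toNat ' ') else 0

/-- Contribution of the whole line to key `v`. -/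
def pvContrib (line : List Char) (v : Int) : Int := pvContribN line line.length v

/-- Total score of key `v` over a list of lines. -/
def pvScore (lines : List (List Char)) (v : Int) : Int :=
  (lines.map (fun l => pvContrib l v)).sum

/-- Column `x`: the `x`-th character of every line long enough. -/
def pvCol (lines : List (List Char)) (x : Nat) : List Char :=
  lines.filterMap (fun l => l[x]?)

/-- Width: max line length. -/
def pvW (lines : List (List Char)) : Nat := lines.foldl (fun m l => max m l.length) 0

/-- The two output characters for a column with signed score `s`. -/
def pvDec (s : Int) : Char × Char :=
  if s > 0 then ('1', '0') else if s < 0 then ('0', '1') else ('S', 'S')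

/-- The two output characters for column `x`, by counting. -/
def pvDecC (lines : List (List Char)) (x : Nat) : Char × Char :=
  pvDec (((pvCol lines x).count '1' : Int) - ((pvCol lines x).count '0' : Int))

/-- Common normal form of both programs' outputs. -/
def pvOut (lines : List (List Char)) : String × String :=
  (String.ofList ((List.range (pvW lines)).map (fun x => (pvDecC lines x).1)),
   String.ofList ((List.range (pvW lines)).map (fun x => (pvDecC lines x).2)))

lemma pvIntRange_succ (n : Nat) : pvIntRange (n + 1) = pvIntRange n ++ [(n : Int)] := by
  unfold pvIntRange
  push_cast
  exact PySem.List.pyRange_one_succ_right (by positivity)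

lemma pvIntRange_nodup (n : Nat) : (pvIntRange n).Nodup := by
  unfold pvIntRange; exact PySem.List.nodup_pyRange_one 0 (n : Int)

lemma pvMem_intRange {n : Nat} {v : Int} : v ∈ pvIntRange n ↔ 0 ≤ v ∧ v < (n : Int) := by
  unfold pvIntRange; exact PySem.List.mem_pyRange_one

lemma pvStep_keys (l : List Char) (cb : PySem.Dict Int Int) (M j : Nat)
    (hj : j ≤ M) (hK : cb.keys = pvIntRange M) :
    (pvStep l cb (j : Int)).keys = pvIntRange (max M (j + 1)) := by
  have hmod : ∀ (N : Nat), j < N → ∀ (d : PySem.Dict Int Int) (f : Int → Int),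
      d.keys = pvIntRange N → (d.modify (j : Int) 0 f).keys = pvIntRange N := by
    intro N hjN d f hd
    have hcd : d.contains (j : Int) = true :=
      (PySem.Dict.contains_iff_mem_keys d _).mpr
        (by rw [hd]; exact pvMem_intRange.mpr ⟨by omega, by omega⟩)
    rw [PySem.Dict.keys_modify, PySem.Dict.keys_insert_of_contains d _ hcd, hd]
  unfold pvStep
  by_cases hc : cb.contains (j : Int) = true
  · have hjM : j < M := by
      have hm := (PySem.Dict.contains_iff_mem_keys cb _).mp hc
      rw [hK] at hm
      have := pvMem_intRange.mp hm
      omega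
    have hmx : max M (j + 1) = M := by omega
    rw [hmx]
    simp only [hc, if_true]
    split <;> split <;>
      first
        | exact hmod M hjM _ _ (hmod M hjM _ _ hK)
        | exact hmod M hjM _ _ hK
        | exact hK
  · have hc' : cb.contains (j : Int) = false := by
      cases h : cb.contains (j : Int) with
      | true => exact absurd h hc
      | false => rfl
    have hjM' : j = M := by
      by_contra hne
      have hjM : j < M := by omega
      exact hc ((PySem.Dict.contains_iff_mem_keys cb _).mpr
        (by rw [hK]; exact pvMem_intRange.mpr ⟨by omega, by omega⟩))
    have hmx : max M (j + 1) = j + 1 := by omega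
    have hI : (cb.insert (j : Int) 0).keys = pvIntRange (j + 1) := by
      rw [PySem.Dict.keys_insert_of_not_contains cb 0 hc', hK, hjM', ← pvIntRange_succ]
    rw [hmx]
    simp only [hc', Bool.false_eq_true, if_false]
    split <;> split <;>
      first
        | exact hmod (j + 1) (by omega) _ _ (hmod (j + 1) (by omega) _ _ hI)
        | exact hmod (j + 1) (by omega) _ _ hI
        | exact hI

lemma pvStep_getD (l : List Char) (cb : PySem.Dict Int Int) (j : Nat) (v : Int) :
    (pvStep l cb (j : Int)).getD v 0
      = cb.getD v 0 + (if v = (j : Int) then pvBitval (l.getD j ' ') else 0) := by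
  unfold pvStep
  dsimp only
  rw [PySem.List.pyGetD_natCast]
  have h1 : ∀ w : Int,
      (if cb.contains (j : Int) = true then cb else cb.insert (j : Int) 0).getD w 0
        = cb.getD w 0 := by
    intro w
    by_cases hc : cb.contains (j : Int) = true
    · simp [hc]
    · have hc' : cb.contains (j : Int) = false := by
        cases h : cb.contains (j : Int) with
        | true => exact absurd h hc
        | false => rfl
      simp only [hc', Bool.false_eq_true, if_false]
      rw [PySem.Dict.getD_insert]
      split
      · next heq => rw [heq, PySem.Dict.getD_of_not_contains cb 0 hc']
      · rfl
  by_cases h0 : l.getD j ' ' = '0'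
  · have hb : pvBitval (l.getD j ' ') = -1 := by rw [h0]; decide
    rw [if_pos h0, if_neg (by rw [h0]; decide), hb, PySem.Dict.getD_modify]
    simp only [h1]
    split_ifs with hv
    · subst hv; ring
    · ring
  · by_cases h1' : l.getD j ' ' = '1'
    · have hb : pvBitval (l.getD j ' ') = 1 := by rw [h1']; decide
      rw [if_neg h0, if_pos h1', hb, PySem.Dict.getD_modify]
      simp only [h1]
      split_ifs with hv
      · subst hv; ring
      · ring
    · have hb : pvBitval (l.getD j ' ') = 0 := by
        unfold pvBitval; rw [if_neg h1', if_neg h0]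
      rw [if_neg h0, if_neg h1', hb, h1 v]
      split_ifs <;> ring

lemma pvContribN_succ (l : List Char) (n : Nat) (v : Int) :
    pvContribN l (n + 1) v
      = pvContribN l n v + (if v = (n : Int) then pvBitval (l.getD n ' ') else 0) := by
  unfold pvContribN
  by_cases hv : v = (n : Int)
  · subst hv
    rw [if_pos ⟨Int.natCast_nonneg n, by omega⟩, if_neg (by omega),
      if_pos rfl, Int.toNat_natCast]
    ring
  · rw [if_neg hv]
    by_cases h : 0 ≤ v ∧ v < (n : Int)
    · rw [if_pos h, if_pos ⟨h.1, by push_cast; omega⟩]; ring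
    · rw [if_neg h, if_neg (by push_cast at h ⊢; omega)]; ring

lemma pvInner (l : List Char) (n : Nat) :
    ∀ (K : Nat) (cb : PySem.Dict Int Int), cb.keys = pvIntRange K →
    ((PySem.List.pyRange 0 (n : Int) 1).foldl (pvStep l) cb).keys = pvIntRange (max K n)
    ∧ ∀ v : Int, ((PySem.List.pyRange 0 (n : Int) 1).foldl (pvStep l) cb).getD v 0
        = cb.getD v 0 + pvContribN l n v := by
  induction n with
  | zero =>
    intro K cb hK
    have h0 : PySem.List.pyRange 0 ((0 : Nat) : Int) 1 = [] :=
      PySem.List.pyRange_one_eq_nil (by simp)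
    rw [h0]
    simp only [List.foldl_nil]
    refine ⟨by simpa using hK, fun v => ?_⟩
    unfold pvContribN
    rw [if_neg (by push_cast; omega)]
    ring
  | succ n ih =>
    intro K cb hK
    have hr : PySem.List.pyRange 0 (((n + 1 : Nat)) : Int) 1
        = PySem.List.pyRange 0 (n : Int) 1 ++ [(n : Int)] := by
      push_cast
      exact PySem.List.pyRange_one_succ_right (by positivity)
    rw [hr, List.foldl_append]
    obtain ⟨hk1, hg1⟩ := ih K cb hK
    simp only [List.foldl_cons, List.foldl_nil]
    refine ⟨?_, fun v => ?_⟩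
    · rw [pvStep_keys l _ (max K n) n (le_max_right K n) hk1]
      congr 1
      omega
    · rw [pvStep_getD l _ n v, hg1 v, pvContribN_succ]
      ring

lemma pvOuter (lines : List (List Char)) :
    ∀ (K : Nat) (cb : PySem.Dict Int Int), cb.keys = pvIntRange K →
    (lines.foldl pvLineStep cb).keys
        = pvIntRange (lines.foldl (fun m l => max m l.length) K)
    ∧ ∀ v : Int, (lines.foldl pvLineStep cb).getD v 0 = cb.getD v 0 + pvScore lines v := by
  induction lines with
  | nil => intro K cb hK; exact ⟨hK, fun v => by simp [pvScore]⟩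
  | cons l ls ih =>
    intro K cb hK
    by_cases h0 : l.length = 0
    · have hstep : pvLineStep cb l = cb := by simp [pvLineStep, h0]
      have hc : ∀ v : Int, pvContrib l v = 0 := by
        intro v
        unfold pvContrib pvContribN
        rw [h0, if_neg (by push_cast; omega)]
      obtain ⟨hk2, hg2⟩ := ih K cb hK
      refine ⟨?_, fun v => ?_⟩
      · simpa [hstep, h0] using hk2
      · simp only [List.foldl_cons, hstep, hg2 v, pvScore, List.map_cons, List.sum_cons, hc v]
        ring_nf
    · have hstep : pvLineStep cb l
          = (PySem.List.pyRange 0 (l.length : Int) 1).foldl (pvStep l) cb := by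
        simp [pvLineStep, h0]
      obtain ⟨hk1, hg1⟩ := pvInner l l.length K cb hK
      obtain ⟨hk2, hg2⟩ := ih (max K l.length) _ (by rw [← hstep] at hk1; exact hk1)
      refine ⟨by simpa using hk2, fun v => ?_⟩
      rw [List.foldl_cons, hg2 v, hstep, hg1 v]
      simp only [pvScore, List.map_cons, List.sum_cons, pvContrib]
      ring

/-- A fold appending one character to each side per element is a pair of maps. -/
lemma pvFoldPairs {α : Type} (c : α → Char × Char) (xs : List α) (acc : List Char × List Char) :
    xs.foldl (fun p a => (p.1 ++ [(c a).1], p.2 ++ [(c a).2])) acc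
      = (acc.1 ++ xs.map (fun a => (c a).1), acc.2 ++ xs.map (fun a => (c a).2)) := by
  induction xs generalizing acc with
  | nil => simp
  | cons a xs ihx => simp [List.foldl_cons, ihx]

lemma pvScore_eq_counts (lines : List (List Char)) (x : Nat) :
    pvScore lines (x : Int)
      = ((pvCol lines x).count '1' : Int) - ((pvCol lines x).count '0' : Int) := by
  induction lines with
  | nil => simp [pvScore, pvCol]
  | cons l ls ih =>
    simp only [pvScore, pvCol, List.map_cons, List.sum_cons, List.filterMap_cons] at ih ⊢
    cases h : l[x]? with
    | none =>
      have hlen : l.length ≤ x := by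
        by_contra hx
        rw [Nat.not_le] at hx
        rw [List.getElem?_eq_getElem hx] at h
        cases h
      have hc0 : pvContrib l (x : Int) = 0 := by
        unfold pvContrib pvContribN
        rw [if_neg (by omega)]
      rw [hc0, ih]
      ring
    | some c =>
      have hx : x < l.length := by
        by_contra hx
        rw [List.getElem?_eq_none (by omega)] at h
        simp at h
      have hc : c = l.getD x ' ' := by
        rw [List.getD_eq_getElem l ' ' hx]
        rw [List.getElem?_eq_getElem hx] at h
        exact (Option.some.inj h).symm
      have hbc : pvContrib l (x : Int) = pvBitval c := by
        unfold pvContrib pvContribN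
        rw [if_pos (by omega)]
        simp [hc]
      rw [hbc, List.count_cons, List.count_cons, ih]
      by_cases h1 : c = '1'
      · subst h1
        have : pvBitval '1' = 1 := by decide
        rw [this]
        simp
        ring
      · by_cases hz : c = '0'
        · subst hz
          have : pvBitval '0' = -1 := by decide
          rw [this]
          simp
          ring
        · have : pvBitval c = 0 := by unfold pvBitval; rw [if_neg h1, if_neg hz]
          rw [this]
          simp [h1, hz]

lemma pvW_filter (lines : List (List Char)) :
    ∀ K : Nat, ((lines.filter (fun l => l ≠ [])).foldl (fun m l => max m l.length) K)
      = lines.foldl (fun m l => max m l.length) K := by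
  induction lines with
  | nil => intro K; rfl
  | cons l ls ih =>
    intro K
    rw [List.filter_cons]
    by_cases hl : l = []
    · subst hl
      simp only [ne_eq, not_true_eq_false, decide_false, Bool.false_eq_true, if_false,
        List.foldl_cons, List.length_nil, Nat.max_zero]
      exact ih K
    · simp only [ne_eq, hl, not_false_eq_true, decide_true, if_true, List.foldl_cons]
      exact ih (max K l.length)

lemma pvCol_filter (lines : List (List Char)) (x : Nat) :
    pvCol (lines.filter (fun l => l ≠ [])) x = pvCol lines x := by
  induction lines with
  | nil => rfl
  | cons l ls ih =>
    rw [List.filter_cons]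
    by_cases hl : l = []
    · subst hl
      simp only [ne_eq, not_true_eq_false, decide_false, Bool.false_eq_true, if_false]
      rw [ih]
      show pvCol ls x = pvCol ([] :: ls) x
      rw [pvCol, pvCol, List.filterMap_cons]
      simp
    · simp only [ne_eq, hl, not_false_eq_true, decide_true, if_true]
      rw [pvCol, pvCol, List.filterMap_cons, List.filterMap_cons]
      cases l[x]? <;> simp only [] <;> rw [← pvCol, ← pvCol, ih]

lemma getOG_eq (data : String) :
    getOG data = pvOut (PySem.Chars.splitOn data.toList ['\n']) := by
  set lines := PySem.Chars.splitOn data.toList ['\n'] with hlines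
  obtain ⟨hkeys, hget⟩ :=
    pvOuter lines 0 PySem.Dict.empty (by simp [pvIntRange, PySem.Dict.keys_empty])
  set d := lines.foldl pvLineStep PySem.Dict.empty with hd
  have hnd : d.keys.Nodup := by rw [hkeys]; exact pvIntRange_nodup _
  have hitems : d.items
      = (List.range (pvW lines)).map (fun x : Nat => ((x : Int), pvScore lines (x : Int))) := by
    rw [PySem.Dict.items_eq_map_keys d hnd 0, hkeys]
    unfold pvIntRange
    rw [PySem.List.pyRange_one]
    simp only [Int.sub_zero, Int.toNat_natCast]
    rw [List.map_map]
    refine List.map_congr_left (fun x hx => ?_)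
    simp only [Function.comp_apply, zero_add]
    rw [hget, PySem.Dict.getD_empty, zero_add]
  have hA : getOG data
      = (let p := d.items.foldl (fun (p : List Char × List Char) kv =>
            if kv.2 > 0 then (p.1 ++ ['1'], p.2 ++ ['0'])
            else if kv.2 < 0 then (p.1 ++ ['0'], p.2 ++ ['1'])
            else (p.1 ++ ['S'], p.2 ++ ['S'])) ([], []);
          (String.ofList p.1, String.ofList p.2)) := rfl
  rw [hA]
  have hfe : (fun (p : List Char × List Char) (kv : Int × Int) =>
        if kv.2 > 0 then (p.1 ++ ['1'], p.2 ++ ['0'])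
        else if kv.2 < 0 then (p.1 ++ ['0'], p.2 ++ ['1'])
        else (p.1 ++ ['S'], p.2 ++ ['S']))
      = (fun p kv => (p.1 ++ [(pvDec kv.2).1], p.2 ++ [(pvDec kv.2).2])) := by
    funext p kv
    unfold pvDec
    split_ifs <;> rfl
  rw [hfe, pvFoldPairs (fun kv => pvDec kv.2) d.items ([], []), hitems]
  simp only [List.map_map, List.nil_append]
  unfold pvOut
  congr 1 <;>
  · congr 1
    refine List.map_congr_left (fun x hx => ?_)
    simp only [Function.comp_apply]
    rw [pvScore_eq_counts]
    rfl

lemma getOG_alt_eq (data : String) :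
    getOG_alt data = pvOut (PySem.Chars.splitOn data.toList ['\n']) := by
  set lines := PySem.Chars.splitOn data.toList ['\n'] with hlines
  set fl := lines.filter (fun l => l ≠ []) with hfl
  have hB : getOG_alt data
      = (let p := (List.range (fl.foldl (fun m l => max m l.length) 0)).foldl
            (fun (p : List Char × List Char) x =>
              let col := fl.filterMap (fun l => l[x]?)
              let ones := col.count '1'
              let zeros := col.count '0'
              if ones > zeros then (p.1 ++ ['1'], p.2 ++ ['0'])
              else if zeros > ones then (p.1 ++ ['0'], p.2 ++ ['1'])
              else (p.1 ++ ['S'], p.2 ++ ['S'])) ([], []);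
          (String.ofList p.1, String.ofList p.2)) := rfl
  rw [hB]
  have hfe : (fun (p : List Char × List Char) (x : Nat) =>
        let col := fl.filterMap (fun l => l[x]?)
        let ones := col.count '1'
        let zeros := col.count '0'
        if ones > zeros then (p.1 ++ ['1'], p.2 ++ ['0'])
        else if zeros > ones then (p.1 ++ ['0'], p.2 ++ ['1'])
        else (p.1 ++ ['S'], p.2 ++ ['S']))
      = (fun p x => (p.1 ++ [(pvDecC lines x).1], p.2 ++ [(pvDecC lines x).2])) := by
    funext p x
    have hcol : fl.filterMap (fun l => l[x]?) = pvCol lines x := pvCol_filter lines x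
    simp only []
    rw [hcol]
    unfold pvDecC pvDec
    rcases Nat.lt_trichotomy ((pvCol lines x).count '1') ((pvCol lines x).count '0') with h | h | h
    · rw [if_neg (by omega), if_pos (by omega), if_neg (by omega), if_pos (by omega)]
    · rw [if_neg (by omega), if_neg (by omega), if_neg (by omega), if_neg (by omega)]
    · rw [if_pos (by omega), if_pos (by omega)]
  rw [hfe, pvFoldPairs (fun x => pvDecC lines x) _ ([], [])]
  have hw : fl.foldl (fun m l => max m l.length) 0 = pvW lines := pvW_filter lines 0
  rw [hw]
  rfl

-- ===== VERDICT (by name: the statement is the Claim_ definition above) =====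
theorem getOG_spec : Claim_equal_getOG := by
  intro data _
  unfold Spec_getOG
  rw [getOG_eq, getOG_alt_eq]
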